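-- pv_equiv track=rewrite | github.com/j3ang/VandyHack2018-vanderbilt-university | PythonScripts/VandyHack/DataCollection/TwiiterUsers/CelebFollowers/twitter_followers.py | token_featureCat
-- ===== SOURCE A (Python) =====
-- from collections import Counter
-- from itertools import chain, combinations
--
-- def token_featureCat(doc_tokens, k=3):
--     c = Counter(doc_tokens)
--     feats = {}
--     for token in doc_tokens:
--         feats['has(%s)'%(token)] = c[token]
--
--     for i in range(0, len(doc_tokens) - k + 1):
--         a = doc_tokens[i : i + k]
--         for co in combinations(a,2):
--             key = 'token_pair=%s__%s' % (co[0],co[1])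
--             if key in feats:
--                 feats[key] = feats[key] + 1
--             else:
--                 feats[key] = 1
--
--     return feats
-- ===== SOURCE B (Python) =====
-- from collections import Counter
--
-- def token_featureCat(doc_tokens, k=3):
--     # has(token) features: Counter iterates tokens in first-occurrence order,
--     # exactly the key order A's overwrite loop produces.
--     feats = {'has(%s)' % t: c for t, c in Counter(doc_tokens).items()}
--     n = len(doc_tokens)
--     if k >= 2 and n >= k:
--         # pairs first seen in window 0, in combinations order
--         for p in range(k - 1):
--             for q in range(p + 1, k):
--                 key = 'token_pair=%s__%s' % (doc_tokens[p], doc_tokens[q])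
--                 m = min(p, n - k) - max(0, q - k + 1) + 1
--                 feats[key] = feats.get(key, 0) + m
--         # pairs first seen when position q enters a window
--         for q in range(k, n):
--             for p in range(q - k + 1, q):
--                 key = 'token_pair=%s__%s' % (doc_tokens[p], doc_tokens[q])
--                 m = min(p, n - k) - max(0, q - k + 1) + 1
--                 feats[key] = feats.get(key, 0) + m
--     return feats
-- ===== Notes on version B (the rewrite author's own statement) =====
-- stated objective: faster
-- what changed: B drops A's window-by-window combinations enumeration and instead makes one pass over positional pairs (p,q) with q-p < k, adding for each pair the closed-form number m = min(p,n-k) - max(0,q-k+1) + 1 of sliding windows that contain both positions; the has(token) dict is built straight from Counter items instead of re-looping over the tokens.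
-- intended difference: For k < 0 with n+k >= 2 the stop index i+k of A's slice doc_tokens[i:i+k] wraps around (Python negative indexing), so A returns accidental token_pair counts taken from wrapped windows of length n+k; B returns only the has() features there (a window of size < 2 has no pairs), the intended reading of k as a window size. — e.g. on token_featureCat(["a", "a", "a"], -1): A returns [("has(a)", 3), ("token_pair=a__a", 1)], B returns [("has(a)", 3)]
import Mathlib
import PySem

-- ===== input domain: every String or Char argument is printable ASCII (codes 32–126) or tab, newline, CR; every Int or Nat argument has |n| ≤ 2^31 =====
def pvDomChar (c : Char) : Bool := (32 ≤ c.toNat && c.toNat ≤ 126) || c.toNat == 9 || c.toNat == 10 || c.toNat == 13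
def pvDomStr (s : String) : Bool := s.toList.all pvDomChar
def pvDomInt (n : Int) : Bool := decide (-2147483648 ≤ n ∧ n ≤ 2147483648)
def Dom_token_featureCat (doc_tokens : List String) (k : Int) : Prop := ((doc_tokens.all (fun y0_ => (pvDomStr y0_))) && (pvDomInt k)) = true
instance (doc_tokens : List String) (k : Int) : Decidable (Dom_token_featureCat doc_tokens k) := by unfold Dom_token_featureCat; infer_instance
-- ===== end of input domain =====

-- B replaces A's window-by-window combination enumeration by a single pass over
-- positional pairs weighted with the closed-form number of windows containing both
-- positions (objective: faster, O(n·k) pair updates instead of O(n·k²)).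

-- ===== PORT A =====
-- itertools.combinations(a, 2) as the list of 2-tuples in CPython's order
def combos2 {α : Type} : List α → List (α × α)
  | [] => []
  | x :: xs => xs.map (fun y => (x, y)) ++ combos2 xs

def token_featureCat (doc_tokens : List String) (k : Int) : List (String × Int) :=
  let c := PySem.Dict.counter doc_tokens
  let feats : PySem.Dict String Int :=
    doc_tokens.foldl (fun f token => f.insert ("has(" ++ token ++ ")") (c.getD token 0))
      PySem.Dict.empty
  let feats := (PySem.List.pyRange 0 ((doc_tokens.length : Int) - k + 1)).foldl (fun f i =>
      let a := PySem.List.slice doc_tokens (some i) (some (i + k))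
      (combos2 a).foldl (fun f co =>
        let key := "token_pair=" ++ co.1 ++ "__" ++ co.2
        match f.get? key with
        | some v => f.insert key (v + 1)
        | none => f.insert key 1) f) feats
  feats.items

-- ===== PORT B =====
def token_featureCat_alt (doc_tokens : List String) (k : Int) : List (String × Int) :=
  let feats : PySem.Dict String Int :=
    (PySem.Dict.counter doc_tokens).items.foldl
      (fun f tc => f.insert ("has(" ++ tc.1 ++ ")") tc.2) PySem.Dict.empty
  let n : Int := doc_tokens.length
  if 2 ≤ k ∧ k ≤ n then
    let feats := (PySem.List.pyRange 0 (k - 1)).foldl (fun f p =>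
      (PySem.List.pyRange (p + 1) k).foldl (fun f q =>
        let key := "token_pair=" ++ PySem.List.pyGetD doc_tokens p "" ++ "__" ++
                   PySem.List.pyGetD doc_tokens q ""
        let m := min p (n - k) - max 0 (q - k + 1) + 1
        f.insert key (f.getD key 0 + m)) f) feats
    let feats := (PySem.List.pyRange k n).foldl (fun f q =>
      (PySem.List.pyRange (q - k + 1) q).foldl (fun f p =>
        let key := "token_pair=" ++ PySem.List.pyGetD doc_tokens p "" ++ "__" ++
                   PySem.List.pyGetD doc_tokens q ""
        let m := min p (n - k) - max 0 (q - k + 1) + 1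
        f.insert key (f.getD key 0 + m)) f) feats
    feats.items
  else
    feats.items

-- ===== PRECONDITION & SPEC =====
-- For k < 0 the stop index i+k of A's slice doc_tokens[i:i+k] wraps around (Python
-- negative indexing), so whenever n+k ≥ 2 A returns accidental token_pair counts from
-- those wrapped windows; B returns no pair features there (a window of size < 2 has no
-- pairs), which is the intended reading of k as a window size.
def D_token_featureCat (doc_tokens : List String) (k : Int) : Prop :=
  k < 0 ∧ 2 ≤ (doc_tokens.length : Int) + k
instance (doc_tokens : List String) (k : Int) : Decidable (D_token_featureCat doc_tokens k) := by
  unfold D_token_featureCat; infer_instance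

def Spec_token_featureCat (doc_tokens : List String) (k : Int) (out : List (String × Int)) : Prop :=
  ¬ D_token_featureCat doc_tokens k → out = token_featureCat_alt doc_tokens k
instance (doc_tokens : List String) (k : Int) (out : List (String × Int)) : Decidable (Spec_token_featureCat doc_tokens k out) := by
  unfold Spec_token_featureCat; infer_instance

def pvDiffWitness_token_featureCat : List String × Int := (["a", "a", "a"], -1)
def pvDiffWitnessOut_token_featureCat : (List (String × Int)) × (List (String × Int)) :=
  ([("has(a)", 3), ("token_pair=a__a", 1)], [("has(a)", 3)])

-- ===== CLAIM (what is proved, stated in full; the proofs are below) =====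
def Claim_unchanged_token_featureCat : Prop := ∀ (doc_tokens : List String) (k : Int), Dom_token_featureCat doc_tokens k → Spec_token_featureCat doc_tokens k (token_featureCat doc_tokens k)
def Claim_changed_token_featureCat : Prop := Dom_token_featureCat (pvDiffWitness_token_featureCat.1) (pvDiffWitness_token_featureCat.2) ∧ D_token_featureCat (pvDiffWitness_token_featureCat.1) (pvDiffWitness_token_featureCat.2) ∧ token_featureCat (pvDiffWitness_token_featureCat.1) (pvDiffWitness_token_featureCat.2) = pvDiffWitnessOut_token_featureCat.1 ∧ token_featureCat_alt (pvDiffWitness_token_featureCat.1) (pvDiffWitness_token_featureCat.2) = pvDiffWitnessOut_token_featureCat.2 ∧ pvDiffWitnessOut_token_featureCat.1 ≠ pvDiffWitnessOut_token_featureCat.2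

def Claim_exact_token_featureCat : Prop := ∀ (doc_tokens : List String) (k : Int), Dom_token_featureCat doc_tokens k → D_token_featureCat doc_tokens k → token_featureCat doc_tokens k ≠ token_featureCat_alt doc_tokens k

-- ===== LEMMAS AND PROOFS =====

-- ---- generic weighted-bump-fold machinery ----

/-- one `feats[key] = feats.get(key, 0) + w` update -/
def tfcBump (f : PySem.Dict String Int) (key : String) (w : Int) : PySem.Dict String Int :=
  f.insert key (f.getD key 0 + w)

/-- a whole loop of such updates -/
def tfcWfold (d : PySem.Dict String Int) (W : List (String × Int)) : PySem.Dict String Int :=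
  W.foldl (fun f kw => tfcBump f kw.1 kw.2) d

/-- total weight a weighted key list adds to `key` -/
def tfcTw (W : List (String × Int)) (key : String) : Int :=
  ((W.filter (fun kw => kw.1 == key)).map (fun kw => kw.2)).sum

/-- the keys of `ks` not in `S`, first occurrences, in order -/
def tfcNew (S : List String) (ks : List String) : List String :=
  (PySem.Set.ofList ks).filter (fun y => !(S.contains y))

theorem tfcWfold_append (d : PySem.Dict String Int) (W1 W2 : List (String × Int)) :
    tfcWfold d (W1 ++ W2) = tfcWfold (tfcWfold d W1) W2 := by
  simp [tfcWfold]

theorem tfcTw_append (W1 W2 : List (String × Int)) (key : String) :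
    tfcTw (W1 ++ W2) key = tfcTw W1 key + tfcTw W2 key := by
  simp [tfcTw]

theorem tfcTw_eq_zero_of_not_mem (W : List (String × Int)) (key : String)
    (h : key ∉ W.map Prod.fst) : tfcTw W key = 0 := by
  have : W.filter (fun kw => kw.1 == key) = [] := by
    apply List.filter_eq_nil_iff.2
    intro kw hkw hbeq
    exact h (List.mem_map.2 ⟨kw, hkw, (eq_of_beq hbeq)⟩)
  simp [tfcTw, this]

theorem tfcTw_singleton (k : String) (w : Int) (key : String) :
    tfcTw [(k, w)] key = if key = k then w else 0 := by
  unfold tfcTw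
  by_cases h : k = key
  · subst h; simp
  · have hb : (k == key) = false := by simpa using h
    rw [if_neg (fun hh => h hh.symm)]
    simp [List.filter, hb]

theorem tfcMem_new (S ks : List String) (y : String) :
    y ∈ tfcNew S ks ↔ y ∈ ks ∧ y ∉ S := by
  simp [tfcNew, List.mem_filter, PySem.Set.mem_ofList _ _]

theorem tfcNew_nodup (S ks : List String) : (tfcNew S ks).Nodup :=
  List.Nodup.filter _ (PySem.Set.nodup_ofList ks)

theorem tfcNew_append_singleton (S ks : List String) (k : String) :
    tfcNew S (ks ++ [k]) = tfcNew S ks ++ (if k ∈ ks ∨ k ∈ S then [] else [k]) := by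
  unfold tfcNew
  rw [PySem.Set.ofList_append_singleton, PySem.Set.add_eq_ite]
  by_cases hk : k ∈ ks
  · rw [if_pos ((PySem.Set.mem_ofList _ _).2 hk), if_pos (Or.inl hk), List.append_nil]
  · rw [if_neg (fun hc => hk ((PySem.Set.mem_ofList _ _).1 hc)), List.filter_append]
    by_cases hS : k ∈ S
    · rw [if_pos (Or.inr hS)]
      simp [hS]
    · rw [if_neg (by tauto)]
      simp [hS]

theorem tfcWfold_items (d : PySem.Dict String Int) (hd : d.keys.Nodup) (W : List (String × Int)) :
    (tfcWfold d W).items =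
      (d.keys ++ tfcNew d.keys (W.map Prod.fst)).map (fun key => (key, d.getD key 0 + tfcTw W key)) := by
  induction W using List.reverseRecOn with
  | nil =>
    simp only [List.map_nil]
    have h0 : tfcNew d.keys [] = [] := rfl
    rw [h0, List.append_nil]
    show d.items = _
    rw [PySem.Dict.items_eq_map_keys d hd (0 : Int)]
    exact List.map_congr_left (fun key _ => by simp [tfcTw])
  | append_singleton W kw ih =>
    obtain ⟨k, w⟩ := kw
    have keysKD : (tfcWfold d W).keys = d.keys ++ tfcNew d.keys (W.map Prod.fst) := by
      show ((tfcWfold d W).items.map Prod.fst) = _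
      rw [ih, List.map_map]
      have hid : ∀ (l : List String),
          l.map (Prod.fst ∘ fun key => (key, d.getD key 0 + tfcTw W key)) = l := by
        intro l
        induction l with
        | nil => rfl
        | cons a t iht => simp only [List.map_cons, Function.comp_apply, iht]
      rw [hid]
    have nodupKD : (tfcWfold d W).keys.Nodup := by
      rw [keysKD, List.nodup_append]
      refine ⟨hd, tfcNew_nodup _ _, fun y hy z hz => ?_⟩
      intro he
      exact ((tfcMem_new _ _ z).1 hz).2 (he ▸ hy)
    have getDKD : ∀ key, (tfcWfold d W).getD key 0 = d.getD key 0 + tfcTw W key := by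
      intro key
      by_cases hkey : key ∈ (tfcWfold d W).keys
      · have hpair : (key, d.getD key 0 + tfcTw W key) ∈ (tfcWfold d W).items := by
          rw [ih]
          rw [keysKD] at hkey
          exact List.mem_map.2 ⟨key, hkey, rfl⟩
        exact PySem.Dict.getD_of_mem_items _ hpair nodupKD 0
      · have hc : (tfcWfold d W).contains key = false :=
          Bool.eq_false_iff.2 (fun h => hkey ((PySem.Dict.contains_iff_mem_keys _ _).1 h))
        rw [PySem.Dict.getD_of_not_contains _ _ hc]
        rw [keysKD, List.mem_append] at hkey
        push_neg at hkey
        have hdk : d.getD key 0 = 0 := by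
          apply PySem.Dict.getD_of_not_contains
          exact Bool.eq_false_iff.2 (fun h => hkey.1 ((PySem.Dict.contains_iff_mem_keys _ _).1 h))
        have htw : tfcTw W key = 0 := by
          apply tfcTw_eq_zero_of_not_mem
          intro hmem
          exact hkey.2 ((tfcMem_new _ _ key).2 ⟨hmem, hkey.1⟩)
        rw [hdk, htw]
        norm_num
    have step : tfcWfold d (W ++ [(k, w)]) = tfcBump (tfcWfold d W) k w := by
      rw [tfcWfold_append]; rfl
    rw [step]
    unfold tfcBump
    have htwapp : ∀ key, tfcTw (W ++ [(k, w)]) key = tfcTw W key + (if key = k then w else 0) := by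
      intro key; rw [tfcTw_append, tfcTw_singleton]
    by_cases hc : (tfcWfold d W).contains k = true
    · -- k already present: in-place update, key list unchanged
      have hkmem : k ∈ d.keys ++ tfcNew d.keys (W.map Prod.fst) := by
        rw [← keysKD]; exact (PySem.Dict.contains_iff_mem_keys _ _).1 hc
      have hnewsame : tfcNew d.keys ((W ++ [(k, w)]).map Prod.fst) = tfcNew d.keys (W.map Prod.fst) := by
        have hmf : (W ++ [(k, w)]).map Prod.fst = W.map Prod.fst ++ [k] := by simp
        rw [hmf, tfcNew_append_singleton, if_pos, List.append_nil]
        rcases List.mem_append.1 hkmem with h | h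
        · exact Or.inr h
        · exact Or.inl ((tfcMem_new _ _ k).1 h).1
      rw [PySem.Dict.items_insert_of_contains _ _ hc, ih, List.map_map, hnewsame]
      apply List.map_congr_left
      intro key hkey2
      simp only [Function.comp]
      by_cases hek : key = k
      · subst hek
        rw [if_pos (by simp), htwapp, getDKD, if_pos rfl, add_assoc]
      · rw [if_neg (by simpa using hek), htwapp, if_neg hek, add_zero]
    · -- fresh key: appended at the end
      have hc' : (tfcWfold d W).contains k = false := Bool.eq_false_iff.2 hc
      have hknot : k ∉ (tfcWfold d W).keys := fun hmem =>
        hc ((PySem.Dict.contains_iff_mem_keys _ _).2 hmem)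
      rw [keysKD] at hknot
      have hknotW : k ∉ W.map Prod.fst := by
        intro hmem
        rw [List.mem_append] at hknot
        push_neg at hknot
        exact hknot.2 ((tfcMem_new _ _ k).2 ⟨hmem, hknot.1⟩)
      have hnew : tfcNew d.keys ((W ++ [(k, w)]).map Prod.fst) =
          tfcNew d.keys (W.map Prod.fst) ++ [k] := by
        have hmf : (W ++ [(k, w)]).map Prod.fst = W.map Prod.fst ++ [k] := by simp
        have hcond : ¬(k ∈ W.map Prod.fst ∨ k ∈ d.keys) := by
          rw [List.mem_append] at hknot
          push_neg at hknot
          rintro (h | h)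
          · exact hknotW h
          · exact hknot.1 h
        rw [hmf, tfcNew_append_singleton, if_neg hcond]
      rw [PySem.Dict.items_insert_of_not_contains _ _ hc', ih, hnew]
      conv_rhs => rw [← List.append_assoc, List.map_append]
      congr 1
      · apply List.map_congr_left
        intro key hkey2
        have hkk : key ≠ k := by
          intro he; subst he
          exact hknot (by simpa using hkey2)
        rw [htwapp, if_neg hkk, add_zero]
      · rw [List.map_singleton, getDKD, htwapp k, if_pos rfl, add_assoc]

theorem tfcWfold_eq (d : PySem.Dict String Int) (hd : d.keys.Nodup)
    (W1 W2 : List (String × Int))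
    (htw : ∀ key, tfcTw W1 key = tfcTw W2 key)
    (hkeys : PySem.Set.ofList (W1.map Prod.fst) = PySem.Set.ofList (W2.map Prod.fst)) :
    tfcWfold d W1 = tfcWfold d W2 := by
  apply PySem.Dict.ext
  rw [tfcWfold_items d hd, tfcWfold_items d hd]
  simp only [tfcNew, hkeys]
  exact List.map_congr_left (fun key _ => by rw [htw])

-- first-occurrence sets only depend on first occurrences
theorem tfcOfList_map_ofList {α β : Type} [BEq α] [LawfulBEq α] [BEq β] [LawfulBEq β] (g : α → β) (l : List α) :
    PySem.Set.ofList (l.map g) = PySem.Set.ofList ((PySem.Set.ofList l).map g) := by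
  induction l using List.reverseRecOn with
  | nil => rfl
  | append_singleton l a ih =>
    rw [List.map_append, List.map_singleton, PySem.Set.ofList_append_singleton,
      PySem.Set.ofList_append_singleton]
    by_cases ha : a ∈ l
    · have h2 : a ∈ PySem.Set.ofList l := (PySem.Set.mem_ofList _ _).2 ha
      have h1 : g a ∈ PySem.Set.ofList (l.map g) := (PySem.Set.mem_ofList _ _).2 (List.mem_map_of_mem ha)
      rw [PySem.Set.add_of_mem h1, PySem.Set.add_of_mem h2, ih]
    · have h2 : a ∉ PySem.Set.ofList l := fun hc => ha ((PySem.Set.mem_ofList _ _).1 hc)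
      rw [PySem.Set.add_of_not_mem h2, List.map_append, List.map_singleton,
        PySem.Set.ofList_append_singleton, ih]

-- ---- phase 1: the has(...) dict ----

def tfcHk (t : String) : String := "has(" ++ t ++ ")"

theorem tfcHk_inj : Function.Injective tfcHk := by
  intro s t h
  have h' : ("has(".toList ++ s.toList) ++ ")".toList = ("has(".toList ++ t.toList) ++ ")".toList := by
    have := congrArg String.toList h
    simpa [tfcHk, List.append_assoc] using this
  have h2 := List.append_cancel_right h'
  have h3 := List.append_cancel_left h2
  have := congrArg String.ofList h3
  simpa using this

def tfcFeats0 (doc : List String) : PySem.Dict String Int :=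
  doc.foldl (fun f token => f.insert (tfcHk token) ((PySem.Dict.counter doc).getD token 0))
    PySem.Dict.empty

theorem tfcFoldInsert_items (v : String → Int) (l : List String) :
    (l.foldl (fun f t => f.insert (tfcHk t) (v t)) (PySem.Dict.empty : PySem.Dict String Int)).items
      = (PySem.Set.ofList l).map (fun t => (tfcHk t, v t)) := by
  induction l using List.reverseRecOn with
  | nil => rfl
  | append_singleton l t ih =>
    rw [List.foldl_append, List.foldl_cons, List.foldl_nil, PySem.Set.ofList_append_singleton]
    have hkeys : (l.foldl (fun f t => f.insert (tfcHk t) (v t))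
        (PySem.Dict.empty : PySem.Dict String Int)).keys = (PySem.Set.ofList l).map tfcHk := by
      show (_ : PySem.Dict String Int).items.map Prod.fst = _
      rw [ih, List.map_map]
      exact List.map_congr_left (fun a _ => rfl)
    by_cases ht : t ∈ l
    · have hc : (l.foldl (fun f t => f.insert (tfcHk t) (v t))
          (PySem.Dict.empty : PySem.Dict String Int)).contains (tfcHk t) = true := by
        rw [PySem.Dict.contains_iff_mem_keys, hkeys]
        exact List.mem_map_of_mem ((PySem.Set.mem_ofList _ _).2 ht)
      rw [PySem.Dict.items_insert_of_contains _ _ hc, ih,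
        PySem.Set.add_of_mem ((PySem.Set.mem_ofList _ _).2 ht), List.map_map]
      apply List.map_congr_left
      intro u hu
      change (if tfcHk u == tfcHk t then (tfcHk t, v t) else (tfcHk u, v u)) = (tfcHk u, v u)
      by_cases hut : u = t
      · subst hut
        exact if_pos (beq_self_eq_true _)
      · exact if_neg (fun hb => hut (tfcHk_inj (eq_of_beq hb)))
    · have hc : (l.foldl (fun f t => f.insert (tfcHk t) (v t))
          (PySem.Dict.empty : PySem.Dict String Int)).contains (tfcHk t) = false := by
        apply Bool.eq_false_iff.2
        intro h
        rw [PySem.Dict.contains_iff_mem_keys, hkeys] at h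
        obtain ⟨u, hu, hue⟩ := List.mem_map.1 h
        exact ht ((PySem.Set.mem_ofList _ _).1 (tfcHk_inj hue ▸ hu))
      rw [PySem.Dict.items_insert_of_not_contains _ _ hc, ih,
        PySem.Set.add_of_not_mem (fun hc2 => ht ((PySem.Set.mem_ofList _ _).1 hc2)),
        List.map_append]
      rfl

theorem tfcFeats0_items (doc : List String) :
    (tfcFeats0 doc).items = (PySem.Set.ofList doc).map (fun t => (tfcHk t, (doc.count t : Int))) := by
  have h := tfcFoldInsert_items (fun t => (PySem.Dict.counter doc).getD t 0) doc
  have he : tfcFeats0 doc =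
      doc.foldl (fun f t => f.insert (tfcHk t) ((PySem.Dict.counter doc).getD t 0))
        (PySem.Dict.empty : PySem.Dict String Int) := rfl
  rw [he, h]
  exact List.map_congr_left (fun t _ => by rw [PySem.Dict.getD_counter])

theorem tfcFeats0_keys_nodup (doc : List String) : (tfcFeats0 doc).keys.Nodup := by
  show ((tfcFeats0 doc).items.map Prod.fst).Nodup
  rw [tfcFeats0_items, List.map_map]
  have : ((PySem.Set.ofList doc).map (Prod.fst ∘ fun t => (tfcHk t, (doc.count t : Int)))) =
      (PySem.Set.ofList doc).map tfcHk := List.map_congr_left (fun a _ => rfl)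
  rw [this]
  exact (PySem.Set.nodup_ofList doc).map tfcHk_inj

theorem tfcFeats0B (doc : List String) :
    (PySem.Dict.counter doc).items.foldl
      (fun f tc => f.insert ("has(" ++ tc.1 ++ ")") tc.2) PySem.Dict.empty = tfcFeats0 doc := by
  apply PySem.Dict.ext
  rw [PySem.Dict.items_counter, List.foldl_map]
  have h := tfcFoldInsert_items (fun t => (doc.count t : Int)) (PySem.Set.ofList doc)
  have he : (PySem.Set.ofList doc).foldl
      (fun f t => f.insert ("has(" ++ t ++ ")") ((doc.count t : Int)))
      (PySem.Dict.empty : PySem.Dict String Int) =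
      (PySem.Set.ofList doc).foldl (fun f t => f.insert (tfcHk t) ((doc.count t : Int)))
      (PySem.Dict.empty : PySem.Dict String Int) := rfl
  rw [he, h, PySem.Set.ofList_ofList, tfcFeats0_items]

-- ---- loop reshaping ----

theorem tfcBump_match (f : PySem.Dict String Int) (key : String) :
    (match f.get? key with
     | some v => f.insert key (v + 1)
     | none => f.insert key 1) = tfcBump f key 1 := by
  unfold tfcBump
  cases h : f.get? key with
  | none => rw [PySem.Dict.getD_of_get?_eq_none f 0 h]; norm_num
  | some v => rw [PySem.Dict.getD_of_get?_eq_some f 0 h]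

theorem tfcWfold_map {α : Type} (d : PySem.Dict String Int) (l : List α) (h : α → String × Int) :
    tfcWfold d (l.map h) = l.foldl (fun f a => tfcBump f (h a).1 (h a).2) d := by
  simp [tfcWfold, List.foldl_map]

theorem tfcWfold_flatMap {α : Type} (d : PySem.Dict String Int) (l : List α) (F : α → List (String × Int)) :
    l.foldl (fun f a => tfcWfold f (F a)) d = tfcWfold d (l.flatMap F) := by
  induction l generalizing d with
  | nil => simp [tfcWfold]
  | cons a l ih => simp only [List.foldl_cons, List.flatMap_cons, tfcWfold_append]; exact ih _

theorem tfcFlatMap_congr {α β : Type} (l : List α) (F G : α → List β)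
    (h : ∀ a ∈ l, F a = G a) : l.flatMap F = l.flatMap G := by
  simp only [List.flatMap]; exact congrArg List.flatten (List.map_congr_left h)

-- ---- index pairs ----

def tfcG (doc : List String) (pq : Int × Int) : String :=
  "token_pair=" ++ PySem.List.pyGetD doc pq.1 "" ++ "__" ++ PySem.List.pyGetD doc pq.2 ""

def tfcPA (k : Int) (m : Int) : List (Int × Int) :=
  (PySem.List.pyRange 0 m).flatMap (fun i => combos2 (PySem.List.pyRange i (i + k)))

def tfcPB (k n : Int) : List (Int × Int) :=
  (PySem.List.pyRange 0 (k - 1)).flatMap (fun p => (PySem.List.pyRange (p + 1) k).map (fun q => (p, q))) ++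
  (PySem.List.pyRange k n).flatMap (fun q => (PySem.List.pyRange (q - k + 1) q).map (fun p => (p, q)))

def tfcMult (k n : Int) (pq : Int × Int) : Int :=
  min pq.1 (n - k) - max 0 (pq.2 - k + 1) + 1

theorem tfcCombos2_map {α β : Type} (f : α → β) (l : List α) :
    combos2 (l.map f) = (combos2 l).map (fun pq => (f pq.1, f pq.2)) := by
  induction l with
  | nil => rfl
  | cons x xs ih => simp [combos2, ih, Function.comp]

theorem tfcCombos2_nil_of_len_le_one {α : Type} (l : List α) (h : l.length ≤ 1) : combos2 l = [] := by
  match l, h with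
  | [], _ => rfl
  | [x], _ => rfl

theorem tfcMem_combos2_pyRange' (t : ℕ) : ∀ (a b : Int), (b - a).toNat = t → ∀ (pq : Int × Int),
    (pq ∈ combos2 (PySem.List.pyRange a b) ↔ a ≤ pq.1 ∧ pq.1 < pq.2 ∧ pq.2 < b) := by
  induction t with
  | zero =>
    intro a b ht pq
    rw [PySem.List.pyRange_one_eq_nil (by omega)]
    simp [combos2]; omega
  | succ t ih =>
    intro a b ht pq
    obtain ⟨p, q⟩ := pq
    rw [PySem.List.pyRange_one_cons (by omega)]
    simp only [combos2, List.mem_append, List.mem_map, PySem.List.mem_pyRange_one,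
      ih (a + 1) b (by omega) (p, q)]
    constructor
    · intro h
      rcases h with ⟨y, hy, h⟩ | h
      · injection h with h1 h2
        omega
      · omega
    · intro h
      by_cases hp : p = a
      · subst hp
        exact Or.inl ⟨q, ⟨by omega, by omega⟩, rfl⟩
      · exact Or.inr (by omega)

theorem tfcMem_combos2_pyRange (a b : Int) (pq : Int × Int) :
    pq ∈ combos2 (PySem.List.pyRange a b) ↔ a ≤ pq.1 ∧ pq.1 < pq.2 ∧ pq.2 < b :=
  tfcMem_combos2_pyRange' (b - a).toNat a b rfl pq

theorem tfcNodup_combos2_pyRange' (t : ℕ) : ∀ (a b : Int), (b - a).toNat = t →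
    (combos2 (PySem.List.pyRange a b)).Nodup := by
  induction t with
  | zero =>
    intro a b ht
    rw [PySem.List.pyRange_one_eq_nil (by omega)]
    simp [combos2]
  | succ t ih =>
    intro a b ht
    rw [PySem.List.pyRange_one_cons (by omega)]
    simp only [combos2]
    rw [List.nodup_append]
    refine ⟨?_, ?_, ?_⟩
    · exact List.Nodup.map (fun x y h => by simpa using congrArg Prod.snd h)
        (PySem.List.nodup_pyRange_one _ _)
    · exact ih (a + 1) b (by omega)
    · intro pq h1 pq2 h2
      obtain ⟨y, _, hy⟩ := List.mem_map.1 h1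
      have hm := (tfcMem_combos2_pyRange' t (a + 1) b (by omega) pq2).1 h2
      intro he
      rw [← he, ← hy] at hm
      simp only at hm
      omega

theorem tfcNodup_combos2_pyRange (a b : Int) : (combos2 (PySem.List.pyRange a b)).Nodup :=
  tfcNodup_combos2_pyRange' (b - a).toNat a b rfl

theorem tfcCombos2_pyRange (a b : Int) :
    combos2 (PySem.List.pyRange a b) =
      (PySem.List.pyRange a (b - 1)).flatMap (fun p => (PySem.List.pyRange (p + 1) b).map (fun q => (p, q))) := by
  have key : ∀ (t : ℕ) (a : Int), (b - a).toNat = t →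
      combos2 (PySem.List.pyRange a b) =
      (PySem.List.pyRange a (b - 1)).flatMap (fun p => (PySem.List.pyRange (p + 1) b).map (fun q => (p, q))) := by
    intro t
    induction t with
    | zero =>
      intro a ht
      rw [PySem.List.pyRange_one_eq_nil (b := b) (by omega),
        PySem.List.pyRange_one_eq_nil (b := b - 1) (by omega)]
      rfl
    | succ t ih =>
      intro a ht
      rw [PySem.List.pyRange_one_cons (by omega)]
      by_cases hab : a < b - 1
      · rw [PySem.List.pyRange_one_cons (a := a) (b := b - 1) (by omega)]
        simp only [combos2, List.flatMap_cons, ih (a + 1) (by omega)]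
      · have h1 : PySem.List.pyRange (a + 1) b = [] := PySem.List.pyRange_one_eq_nil (by omega)
        have h2 : PySem.List.pyRange a (b - 1) = [] := PySem.List.pyRange_one_eq_nil (by omega)
        simp [combos2, h1, h2]
  exact key (b - a).toNat a rfl

theorem tfcCombos2_filter_last (a b : Int) :
    (combos2 (PySem.List.pyRange a b)).filter (fun pq => decide (pq.2 = b - 1)) =
      (PySem.List.pyRange a (b - 1)).map (fun p => (p, b - 1)) := by
  have range_last : ∀ (t : ℕ) (x : Int), (b - x).toNat = t →
      (PySem.List.pyRange x b).filter (fun q => decide (q = b - 1)) =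
        if x ≤ b - 1 then [b - 1] else [] := by
    intro t
    induction t with
    | zero =>
      intro x ht
      rw [PySem.List.pyRange_one_eq_nil (by omega)]
      rw [if_neg (by omega)]
      rfl
    | succ t ih =>
      intro x ht
      rw [PySem.List.pyRange_one_cons (by omega), if_pos (by omega)]
      by_cases hx : x = b - 1
      · have h1 : PySem.List.pyRange (x + 1) b = [] := PySem.List.pyRange_one_eq_nil (by omega)
        simp [hx]
      · rw [List.filter_cons, if_neg (by simp [hx]), ih (x + 1) (by omega), if_pos (by omega)]
  have key : ∀ (t : ℕ) (a : Int), (b - a).toNat = t →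
      (combos2 (PySem.List.pyRange a b)).filter (fun pq => decide (pq.2 = b - 1)) =
        (PySem.List.pyRange a (b - 1)).map (fun p => (p, b - 1)) := by
    intro t
    induction t with
    | zero =>
      intro a ht
      rw [PySem.List.pyRange_one_eq_nil (b := b) (by omega),
        PySem.List.pyRange_one_eq_nil (b := b - 1) (by omega)]
      rfl
    | succ t ih =>
      intro a ht
      rw [PySem.List.pyRange_one_cons (by omega)]
      simp only [combos2, List.filter_append, List.filter_map]
      have hcomp : ((fun pq : Int × Int => decide (pq.2 = b - 1)) ∘ (fun q => (a, q))) =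
          (fun q : Int => decide (q = b - 1)) := by
        funext q; rfl
      rw [hcomp, range_last (b - (a + 1)).toNat (a + 1) rfl, ih (a + 1) (by omega)]
      by_cases hab : a < b - 1
      · rw [if_pos (by omega), PySem.List.pyRange_one_cons (a := a) (b := b - 1) (by omega)]
        rfl
      · have h2 : PySem.List.pyRange a (b - 1) = [] := PySem.List.pyRange_one_eq_nil (by omega)
        have h3 : PySem.List.pyRange (a + 1) (b - 1) = [] := PySem.List.pyRange_one_eq_nil (by omega)
        rw [if_neg (by omega), h2, h3]
        rfl
  exact key (b - a).toNat a rfl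

-- tfcPB with the second loop's q-range written via the window count m
def tfcPBm (k m : Int) : List (Int × Int) :=
  (PySem.List.pyRange 0 (k - 1)).flatMap (fun p => (PySem.List.pyRange (p + 1) k).map (fun q => (p, q))) ++
  (PySem.List.pyRange k (m + k - 1)).flatMap (fun q => (PySem.List.pyRange (q - k + 1) q).map (fun p => (p, q)))

theorem tfcPB_eq_PBm (k n : Int) : tfcPB k n = tfcPBm k (n - k + 1) := by
  unfold tfcPB tfcPBm
  rw [show n - k + 1 + k - 1 = n by ring]

theorem tfcMem_PBm (k m : Int) (hm : 1 ≤ m) (pq : Int × Int) :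
    pq ∈ tfcPBm k m ↔ 0 ≤ pq.1 ∧ pq.1 < pq.2 ∧ pq.2 ≤ m + k - 2 ∧ pq.2 - pq.1 ≤ k - 1 := by
  obtain ⟨p, q⟩ := pq
  unfold tfcPBm
  simp only [List.mem_append, List.mem_flatMap, List.mem_map, PySem.List.mem_pyRange_one,
    Prod.mk.injEq]
  constructor
  · rintro (⟨p', ⟨hp1, hp2⟩, q', ⟨hq1, hq2⟩, he1, he2⟩ | ⟨q', ⟨hq1, hq2⟩, p', ⟨hp1, hp2⟩, he1, he2⟩) <;>
      omega
  · intro h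
    by_cases hq : q ≤ k - 1
    · exact Or.inl ⟨p, ⟨by omega, by omega⟩, q, ⟨by omega, by omega⟩, rfl, rfl⟩
    · exact Or.inr ⟨q, ⟨by omega, by omega⟩, p, ⟨by omega, by omega⟩, rfl, rfl⟩

-- C1: B's enumeration is exactly the first occurrences of A's
theorem tfcC1' (k : Int) (hk : 2 ≤ k) : ∀ (t : ℕ) (m : Int), m = 1 + (t : Int) →
    PySem.Set.ofList (tfcPA k m) = tfcPBm k m := by
  intro t
  induction t with
  | zero =>
    intro m hm
    subst hm
    unfold tfcPA
    rw [show (1 : Int) + (0 : ℕ) = 0 + 1 by norm_num, PySem.List.pyRange_one_succ_right (by norm_num),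
      PySem.List.pyRange_one_eq_nil (le_refl 0)]
    simp only [List.nil_append, List.flatMap_cons, List.flatMap_nil, List.append_nil]
    rw [PySem.Set.ofList_eq_self_of_nodup _ (tfcNodup_combos2_pyRange 0 (0 + k))]
    unfold tfcPBm
    rw [show (0 : Int) + 1 + k - 1 = k by ring, PySem.List.pyRange_one_eq_nil (le_refl k)]
    simp only [List.flatMap_nil, List.append_nil]
    rw [show (0 : Int) + k = k by ring, tfcCombos2_pyRange]
  | succ t ih =>
    intro m hm
    have hm1 : 1 ≤ m - 1 := by omega
    have e0 : m = (m - 1) + 1 := by ring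
    unfold tfcPA
    rw [e0, PySem.List.pyRange_one_succ_right (by omega), List.flatMap_append]
    simp only [List.flatMap_cons, List.flatMap_nil, List.append_nil]
    rw [PySem.Set.ofList_append]
    have ihm : PySem.Set.ofList (tfcPA k (m - 1)) = tfcPBm k (m - 1) := ih (m - 1) (by omega)
    rw [show (PySem.List.pyRange 0 (m-1)).flatMap (fun i => combos2 (PySem.List.pyRange i (i + k))) = tfcPA k (m-1) from rfl,
      ihm, PySem.Set.update_eq_append_filter,
      PySem.Set.ofList_eq_self_of_nodup _ (tfcNodup_combos2_pyRange (m-1) (m-1+k))]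
    have hfc : (combos2 (PySem.List.pyRange (m-1) (m-1+k))).filter
        (fun y => !(PySem.Set.contains (tfcPBm k (m-1)) y)) =
        (combos2 (PySem.List.pyRange (m-1) (m-1+k))).filter
        (fun pq => decide (pq.2 = (m-1+k) - 1)) := by
      apply List.filter_congr
      intro pq hmem
      have hb := (tfcMem_combos2_pyRange (m-1) (m-1+k) pq).1 hmem
      by_cases hpb : pq ∈ tfcPBm k (m-1)
      · have hc : PySem.Set.contains (tfcPBm k (m-1)) pq = true :=
          (PySem.Set.contains_iff _ _).2 hpb
        have hbm := (tfcMem_PBm k (m-1) (by omega) pq).1 hpb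
        rw [hc]
        simp only [Bool.not_true]
        symm
        simp only [decide_eq_false_iff_not]
        omega
      · have hc : PySem.Set.contains (tfcPBm k (m-1)) pq = false :=
          Bool.eq_false_iff.2 (fun h => hpb ((PySem.Set.contains_iff _ _).1 h))
        have hbm : ¬ (0 ≤ pq.1 ∧ pq.1 < pq.2 ∧ pq.2 ≤ (m-1) + k - 2 ∧ pq.2 - pq.1 ≤ k - 1) :=
          fun h => hpb ((tfcMem_PBm k (m-1) (by omega) pq).2 h)
        rw [hc]
        simp only [Bool.not_false]
        symm
        simp only [decide_eq_true_eq]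
        omega
    rw [hfc, tfcCombos2_filter_last]
    unfold tfcPBm
    rw [show m - 1 + 1 + k - 1 = (m - 1 + k - 1) + 1 by ring,
      PySem.List.pyRange_one_succ_right (by omega), List.flatMap_append]
    simp only [List.flatMap_cons, List.flatMap_nil, List.append_nil]
    rw [show m - 1 + k - 1 - k + 1 = m - 1 by ring, List.append_assoc]

theorem tfcC1 (k n : Int) (hk : 2 ≤ k) (hn : k ≤ n) :
    PySem.Set.ofList (tfcPA k (n - k + 1)) = tfcPB k n := by
  rw [tfcPB_eq_PBm]
  exact tfcC1' k hk (n - k).toNat (n - k + 1) (by omega)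

theorem tfcCount_flatMap {α β : Type} [BEq α] (F : β → List α) (l : List β) (a : α) :
    (l.flatMap F).count a = (l.map (fun b => (F b).count a)).sum := by
  induction l with
  | nil => rfl
  | cons b l ih => simp [List.count_append, ih]

theorem tfcSum_ite {α : Type} (l : List α) (c : α → Prop) [DecidablePred c] :
    (l.map (fun x => if c x then (1 : ℕ) else 0)).sum = l.countP (fun x => decide (c x)) := by
  induction l with
  | nil => rfl
  | cons b l ih =>
    simp only [List.map_cons, List.sum_cons, List.countP_cons, ih]
    by_cases h : c b <;> simp [h] <;> omega

theorem tfcCountP_interval (lo hi : Int) : ∀ (t : ℕ) (a b : Int), (b - a).toNat = t →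
    (PySem.List.pyRange a b).countP (fun i => decide (lo ≤ i ∧ i ≤ hi)) =
      (min b (hi + 1) - max a lo).toNat := by
  intro t
  induction t with
  | zero =>
    intro a b ht
    rw [PySem.List.pyRange_one_eq_nil (by omega)]
    simp only [List.countP_nil]
    omega
  | succ t ih =>
    intro a b ht
    rw [PySem.List.pyRange_one_cons (by omega), List.countP_cons, ih (a + 1) b (by omega)]
    by_cases hc : lo ≤ a ∧ a ≤ hi
    · rw [if_pos (by simpa using hc)]
      omega
    · rw [if_neg (by simpa using hc)]
      omega

-- C2: the multiplicity formula counts A's occurrences of a pair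
theorem tfcC2 (k n : Int) (hk : 2 ≤ k) (hn : k ≤ n) (pq : Int × Int) (hpq : pq ∈ tfcPB k n) :
    (List.count pq (tfcPA k (n - k + 1)) : Int) = tfcMult k n pq := by
  have hb := (tfcMem_PBm k (n - k + 1) (by omega) pq).1 (tfcPB_eq_PBm k n ▸ hpq)
  unfold tfcPA
  rw [tfcCount_flatMap]
  have hwin : ∀ i, (combos2 (PySem.List.pyRange i (i + k))).count pq =
      if (i ≤ pq.1 ∧ pq.1 < pq.2 ∧ pq.2 < i + k) then 1 else 0 := by
    intro i
    by_cases hm : pq ∈ combos2 (PySem.List.pyRange i (i + k))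
    · rw [if_pos ((tfcMem_combos2_pyRange i (i + k) pq).1 hm)]
      exact List.count_eq_one_of_mem (tfcNodup_combos2_pyRange i (i + k)) hm
    · rw [if_neg (fun h => hm ((tfcMem_combos2_pyRange i (i + k) pq).2 h)),
        List.count_eq_zero_of_not_mem hm]
  have hmap : (PySem.List.pyRange 0 (n - k + 1)).map
        (fun i => (combos2 (PySem.List.pyRange i (i + k))).count pq) =
      (PySem.List.pyRange 0 (n - k + 1)).map
        (fun i => if (pq.2 - k + 1 ≤ i ∧ i ≤ pq.1) then (1 : ℕ) else 0) := by
    apply List.map_congr_left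
    intro i hi
    rw [hwin i]
    by_cases hc : pq.2 - k + 1 ≤ i ∧ i ≤ pq.1
    · rw [if_pos (by omega), if_pos hc]
    · rw [if_neg (by omega), if_neg hc]
  rw [hmap, tfcSum_ite, tfcCountP_interval (pq.2 - k + 1) pq.1 (n - k + 1 - 0).toNat 0 (n - k + 1) (by omega)]
  unfold tfcMult
  omega

theorem tfcCountP_split {α : Type} [BEq α] [LawfulBEq α] (P : α → Bool) (a : α) (l : List α) :
    l.countP P = (l.filter (fun x => !(x == a))).countP P + (if P a then l.count a else 0) := by
  induction l with
  | nil => simp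
  | cons b t iht =>
    by_cases hb : (b == a) = true
    · have hba : b = a := eq_of_beq hb
      subst hba
      simp only [List.countP_cons, List.filter_cons, hb, Bool.not_true, Bool.false_eq_true,
        if_false, List.count_cons_self]
      rw [iht]
      cases hP : P b <;> simp [hP] <;> omega
    · have hbf : (b == a) = false := Bool.eq_false_iff.2 hb
      have haf : (a == b) = false :=
        Bool.eq_false_iff.2 (fun h => hb (by simp [eq_of_beq h]))
      simp only [List.countP_cons, List.filter_cons, hbf, Bool.not_false, if_true,
        List.count_cons, List.countP_cons]
      rw [iht]
      cases hP : P a <;> cases hPb : P b <;> simp [hP, hPb, haf] <;> omega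

theorem tfcL2 {α : Type} [BEq α] [LawfulBEq α] (P : α → Bool) :
    ∀ (l' l : List α), l'.Nodup → (∀ x, x ∈ l' ↔ x ∈ l) →
    ((l'.filter P).map (fun x => (l.count x : Int))).sum = (l.countP P : Int) := by
  intro l'
  induction l' with
  | nil =>
    intro l _ hmem
    have hl : l = [] := List.eq_nil_iff_forall_not_mem.2 (fun x hx => List.not_mem_nil ((hmem x).2 hx))
    subst hl; simp
  | cons a l'' ih =>
    intro l hnd hmem
    have hna : a ∉ l'' := (List.nodup_cons.1 hnd).1
    have hnd'' : l''.Nodup := (List.nodup_cons.1 hnd).2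
    have hmem2 : ∀ x, x ∈ l'' ↔ x ∈ l.filter (fun y => !(y == a)) := by
      intro x
      rw [List.mem_filter]
      constructor
      · intro hx
        refine ⟨(hmem x).1 (List.mem_cons_of_mem _ hx), ?_⟩
        have hxa : x ≠ a := fun he => hna (he ▸ hx)
        simp [hxa]
      · rintro ⟨hx, hxa⟩
        have hxa' : x ≠ a := by simpa using hxa
        rcases List.mem_cons.1 ((hmem x).2 hx) with he | h
        · exact (hxa' he).elim
        · exact h
    have IH := ih (l.filter (fun y => !(y == a))) hnd'' hmem2
    have hcnt : ((l''.filter P).map (fun x => ((l.filter (fun y => !(y == a))).count x : Int))).sum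
        = ((l''.filter P).map (fun x => (l.count x : Int))).sum := by
      apply congrArg
      apply List.map_congr_left
      intro x hx
      have hxl : x ∈ l'' := List.mem_of_mem_filter hx
      have hxa : x ≠ a := fun he => hna (he ▸ hxl)
      rw [List.count_filter (by simp [hxa])]
    have hsplit := tfcCountP_split P a l
    rw [List.filter_cons]
    cases hPa : P a
    · simp only [Bool.false_eq_true, if_false]
      rw [← hcnt, IH, hsplit, hPa]
      push_cast
      simp
    · simp only [if_true]
      rw [List.map_cons, List.sum_cons, ← hcnt, IH, hsplit, hPa]
      push_cast
      simp
      omega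

theorem tfcTw_map {α : Type} (g : α → String) (w : α → Int) (l : List α) (key : String) :
    tfcTw (l.map (fun x => (g x, w x))) key = ((l.filter (fun x => g x == key)).map w).sum := by
  unfold tfcTw
  rw [List.filter_map, List.map_map]
  rfl

theorem tfcSum_ones {α : Type} (l : List α) : (l.map (fun _ => (1 : Int))).sum = l.length := by
  induction l with
  | nil => rfl
  | cons a t ih => simp [ih]; omega

-- total-weight bookkeeping
theorem tfcTw_eq (k n : Int) (hk : 2 ≤ k) (hn : k ≤ n) (doc : List String) (key : String) :
    tfcTw ((tfcPA k (n - k + 1)).map (fun pq => (tfcG doc pq, 1))) key =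
    tfcTw ((tfcPB k n).map (fun pq => (tfcG doc pq, tfcMult k n pq))) key := by
  have hC1 := tfcC1 k n hk hn
  rw [tfcTw_map (tfcG doc) (fun _ => 1), tfcTw_map (tfcG doc) (fun pq => tfcMult k n pq)]
  rw [tfcSum_ones]
  have hBside : ((tfcPB k n).filter (fun pq => tfcG doc pq == key)).map (fun pq => tfcMult k n pq)
      = ((tfcPB k n).filter (fun pq => tfcG doc pq == key)).map
          (fun pq => (List.count pq (tfcPA k (n - k + 1)) : Int)) := by
    apply List.map_congr_left
    intro pq hpq
    exact (tfcC2 k n hk hn pq (List.mem_of_mem_filter hpq)).symm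
  rw [hBside]
  rw [tfcL2 (fun pq => tfcG doc pq == key) (tfcPB k n) (tfcPA k (n - k + 1))
    (by rw [← hC1]; exact PySem.Set.nodup_ofList _)
    (by intro x; rw [← hC1]; exact PySem.Set.mem_ofList _ x)]
  rw [List.countP_eq_length_filter]

-- slices of in-range windows are mapped index ranges
theorem tfcSlice_window (doc : List String) (i k : Int) (h0 : 0 ≤ i) (hk : 0 ≤ k)
    (h1 : i + k ≤ (doc.length : Int)) :
    PySem.List.slice doc (some i) (some (i + k)) =
      (PySem.List.pyRange i (i + k)).map (fun j => PySem.List.pyGetD doc j "") := by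
  rw [PySem.List.slice_toNat doc h0 (by omega)]
  apply List.ext_getElem
  · simp only [List.length_take, List.length_drop, List.length_map,
      PySem.List.length_pyRange_one]
    omega
  · intro j hj1 hj2
    rw [List.getElem_take, List.getElem_drop, List.getElem_map,
      PySem.List.getElem_pyRange_one]
    simp only [List.length_take, List.length_drop] at hj1
    rw [PySem.List.pyGetD_eq_getElem doc "" (by omega) (by push_cast; omega)]
    congr 1
    omega

-- A's whole pair loop as a weighted fold
theorem tfcA_eq_wfold (doc : List String) (k : Int) :
    token_featureCat doc k =
      (tfcWfold (tfcFeats0 doc)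
        ((PySem.List.pyRange 0 ((doc.length : Int) - k + 1)).flatMap
          (fun i => (combos2 (PySem.List.slice doc (some i) (some (i + k)))).map
            (fun co => ("token_pair=" ++ co.1 ++ "__" ++ co.2, 1))))).items := by
  have h1 : ∀ (f : PySem.Dict String Int) (l : List (String × String)),
      l.foldl (fun f co =>
        let key := "token_pair=" ++ co.1 ++ "__" ++ co.2
        match f.get? key with
        | some v => f.insert key (v + 1)
        | none => f.insert key 1) f
      = tfcWfold f (l.map (fun co => ("token_pair=" ++ co.1 ++ "__" ++ co.2, 1))) := by
    intro f l
    rw [tfcWfold_map]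
    have hfun : (fun (f : PySem.Dict String Int) (co : String × String) =>
        let key := "token_pair=" ++ co.1 ++ "__" ++ co.2
        match f.get? key with
        | some v => f.insert key (v + 1)
        | none => f.insert key 1) =
        (fun (f : PySem.Dict String Int) (co : String × String) =>
          tfcBump f ("token_pair=" ++ co.1 ++ "__" ++ co.2) 1) :=
      funext fun f => funext fun co => tfcBump_match f _
    rw [hfun]
  simp only [token_featureCat]
  simp only [h1]
  rw [tfcWfold_flatMap]
  rfl

theorem tfcB_eq_wfold (doc : List String) (k : Int) (h : 2 ≤ k ∧ k ≤ (doc.length : Int)) :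
    token_featureCat_alt doc k =
      (tfcWfold (tfcFeats0 doc)
        ((tfcPB k (doc.length : Int)).map
          (fun pq => (tfcG doc pq, tfcMult k (doc.length : Int) pq)))).items := by
  have h2 : ∀ (f : PySem.Dict String Int) (p : Int),
      (PySem.List.pyRange (p + 1) k).foldl (fun f q =>
        let key := "token_pair=" ++ PySem.List.pyGetD doc p "" ++ "__" ++
                   PySem.List.pyGetD doc q ""
        let m := min p ((doc.length : Int) - k) - max 0 (q - k + 1) + 1
        f.insert key (f.getD key 0 + m)) f
      = tfcWfold f ((PySem.List.pyRange (p + 1) k).map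
          (fun q => (tfcG doc (p, q), tfcMult k (doc.length : Int) (p, q)))) := by
    intro f p
    exact (tfcWfold_map f (PySem.List.pyRange (p + 1) k)
      (fun q => (tfcG doc (p, q), tfcMult k (doc.length : Int) (p, q)))).symm
  have h3 : ∀ (f : PySem.Dict String Int) (q : Int),
      (PySem.List.pyRange (q - k + 1) q).foldl (fun f p =>
        let key := "token_pair=" ++ PySem.List.pyGetD doc p "" ++ "__" ++
                   PySem.List.pyGetD doc q ""
        let m := min p ((doc.length : Int) - k) - max 0 (q - k + 1) + 1
        f.insert key (f.getD key 0 + m)) f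
      = tfcWfold f ((PySem.List.pyRange (q - k + 1) q).map
          (fun p => (tfcG doc (p, q), tfcMult k (doc.length : Int) (p, q)))) := by
    intro f q
    exact (tfcWfold_map f (PySem.List.pyRange (q - k + 1) q)
      (fun p => (tfcG doc (p, q), tfcMult k (doc.length : Int) (p, q)))).symm
  simp only [token_featureCat_alt]
  rw [if_pos h]
  simp only [h2, h3]
  rw [tfcWfold_flatMap, tfcWfold_flatMap, ← tfcWfold_append, tfcFeats0B]
  have hW : ((tfcPB k (doc.length : Int)).map
      (fun pq => (tfcG doc pq, tfcMult k (doc.length : Int) pq))) =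
      ((PySem.List.pyRange 0 (k - 1)).flatMap (fun p => (PySem.List.pyRange (p + 1) k).map
        (fun q => (tfcG doc (p, q), tfcMult k (doc.length : Int) (p, q))))) ++
      ((PySem.List.pyRange k (doc.length : Int)).flatMap (fun q => (PySem.List.pyRange (q - k + 1) q).map
        (fun p => (tfcG doc (p, q), tfcMult k (doc.length : Int) (p, q))))) := by
    unfold tfcPB
    rw [List.map_append, List.map_flatMap, List.map_flatMap]
    congr 1
    · exact tfcFlatMap_congr _ _ _ (fun p _ => by rw [List.map_map]; rfl)
    · exact tfcFlatMap_congr _ _ _ (fun q _ => by rw [List.map_map]; rfl)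
  rw [hW]

theorem tfcA_pairs (doc : List String) (k : Int) (hk : 2 ≤ k) (hn : k ≤ (doc.length : Int)) :
    (PySem.List.pyRange 0 ((doc.length : Int) - k + 1)).flatMap
      (fun i => (combos2 (PySem.List.slice doc (some i) (some (i + k)))).map
        (fun co => ("token_pair=" ++ co.1 ++ "__" ++ co.2, (1 : Int)))) =
    (tfcPA k ((doc.length : Int) - k + 1)).map (fun pq => (tfcG doc pq, (1 : Int))) := by
  unfold tfcPA
  rw [List.map_flatMap]
  apply tfcFlatMap_congr
  intro i hi
  rw [PySem.List.mem_pyRange_one] at hi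
  rw [tfcSlice_window doc i k (by omega) (by omega) (by omega), tfcCombos2_map, List.map_map]
  exact List.map_congr_left (fun pq _ => rfl)

theorem tfcMain (doc : List String) (k : Int) (hnd : ¬ D_token_featureCat doc k) :
    token_featureCat doc k = token_featureCat_alt doc k := by
  by_cases hg : 2 ≤ k ∧ k ≤ (doc.length : Int)
  · obtain ⟨hk, hn⟩ := hg
    rw [tfcA_eq_wfold, tfcB_eq_wfold doc k ⟨hk, hn⟩]
    congr 1
    rw [tfcA_pairs doc k hk hn]
    apply tfcWfold_eq _ (tfcFeats0_keys_nodup doc)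
    · intro key
      exact tfcTw_eq k (doc.length : Int) hk hn doc key
    · rw [List.map_map, List.map_map]
      have hA : ((tfcPA k ((doc.length : Int) - k + 1)).map
          (Prod.fst ∘ fun pq => (tfcG doc pq, (1 : Int)))) =
          (tfcPA k ((doc.length : Int) - k + 1)).map (tfcG doc) :=
        List.map_congr_left (fun pq _ => rfl)
      have hB : ((tfcPB k (doc.length : Int)).map
          (Prod.fst ∘ fun pq => (tfcG doc pq, tfcMult k (doc.length : Int) pq))) =
          (tfcPB k (doc.length : Int)).map (tfcG doc) :=
        List.map_congr_left (fun pq _ => rfl)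
      rw [hA, hB, tfcOfList_map_ofList (tfcG doc), tfcC1 k (doc.length : Int) hk hn]
  · have hB : token_featureCat_alt doc k = (tfcFeats0 doc).items := by
      simp only [token_featureCat_alt]
      rw [if_neg hg, tfcFeats0B]
    rw [hB, tfcA_eq_wfold]
    have hWA : ((PySem.List.pyRange 0 ((doc.length : Int) - k + 1)).flatMap
        (fun i => (combos2 (PySem.List.slice doc (some i) (some (i + k)))).map
          (fun co => ("token_pair=" ++ co.1 ++ "__" ++ co.2, (1 : Int))))) = [] := by
      by_cases hk2 : 2 ≤ k
      · have hkn : (doc.length : Int) < k := by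
          rcases not_and_or.1 hg with h | h
          · exact absurd hk2 h
          · omega
        rw [PySem.List.pyRange_one_eq_nil (by omega)]
        rfl
      · have hk1 : k ≤ 1 := by omega
        rw [tfcFlatMap_congr _ _ (fun _ => []) ?_]
        · simp
        intro i hi
        rw [PySem.List.mem_pyRange_one] at hi
        have hcom : combos2 (PySem.List.slice doc (some i) (some (i + k))) = [] := by
          apply tfcCombos2_nil_of_len_le_one
          rw [PySem.List.length_slice]
          have hcl : PySem.List.clampIdx doc.length (i + k) ≤
              PySem.List.clampIdx doc.length i + 1 := by
            have hD : ¬(k < 0 ∧ 2 ≤ (doc.length : Int) + k) := hnd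
            simp only [PySem.List.clampIdx]
            split_ifs <;> omega
          omega
        rw [hcom]
        rfl
    rw [hWA]
    rfl

theorem tfcExact (doc : List String) (k : Int) (hD : D_token_featureCat doc k) :
    token_featureCat doc k ≠ token_featureCat_alt doc k := by
  obtain ⟨hk0, hnk⟩ := hD
  have hB : token_featureCat_alt doc k = (tfcFeats0 doc).items := by
    simp only [token_featureCat_alt]
    rw [if_neg (by omega), tfcFeats0B]
  rw [tfcA_eq_wfold, hB]
  intro he
  have hitems := tfcWfold_items (tfcFeats0 doc) (tfcFeats0_keys_nodup doc)
    ((PySem.List.pyRange 0 ((doc.length : Int) - k + 1)).flatMap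
      (fun i => (combos2 (PySem.List.slice doc (some i) (some (i + k)))).map
        (fun co => ("token_pair=" ++ co.1 ++ "__" ++ co.2, (1 : Int)))))
  -- window 0 has the wrapped length n+k ≥ 2, hence at least one pair
  have h0len : 2 ≤ (PySem.List.slice doc (some 0) (some (0 + k))).length := by
    rw [PySem.List.length_slice]
    simp only [PySem.List.clampIdx]
    split_ifs <;> omega
  obtain ⟨x, y, rest, hxy⟩ : ∃ x y rest,
      PySem.List.slice doc (some 0) (some (0 + k)) = x :: y :: rest := by
    cases hs : PySem.List.slice doc (some 0) (some (0 + k)) with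
    | nil => rw [hs] at h0len; simp at h0len
    | cons x t =>
      cases t with
      | nil => rw [hs] at h0len; simp at h0len
      | cons y rest => exact ⟨x, y, rest, rfl⟩
  have hKmem : ("token_pair=" ++ x ++ "__" ++ y) ∈
      ((PySem.List.pyRange 0 ((doc.length : Int) - k + 1)).flatMap
        (fun i => (combos2 (PySem.List.slice doc (some i) (some (i + k)))).map
          (fun co => ("token_pair=" ++ co.1 ++ "__" ++ co.2, (1 : Int))))).map Prod.fst := by
    apply List.mem_map.2
    refine ⟨("token_pair=" ++ x ++ "__" ++ y, 1), ?_, rfl⟩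
    apply List.mem_flatMap.2
    refine ⟨0, by rw [PySem.List.mem_pyRange_one]; omega, ?_⟩
    rw [hxy]
    apply List.mem_map.2
    refine ⟨(x, y), ?_, rfl⟩
    show (x, y) ∈ (y :: rest).map (fun z => (x, z)) ++ combos2 (y :: rest)
    exact List.mem_append.2 (Or.inl (List.mem_map.2 ⟨y, List.mem_cons_self .., rfl⟩))
  have hKnotS : ("token_pair=" ++ x ++ "__" ++ y) ∉ (tfcFeats0 doc).keys := by
    intro hmem
    have hkeys : (tfcFeats0 doc).keys = (PySem.Set.ofList doc).map
        (Prod.fst ∘ fun t => (tfcHk t, (doc.count t : Int))) := by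
      show (tfcFeats0 doc).items.map Prod.fst = _
      rw [tfcFeats0_items, List.map_map]
    rw [hkeys] at hmem
    obtain ⟨t, _, ht⟩ := List.mem_map.1 hmem
    have ht' : tfcHk t = "token_pair=" ++ x ++ "__" ++ y := ht
    have hfront : (tfcHk t).toList = 'h' :: ('a' :: ('s' :: ('(' :: (t.toList ++ [')'])))) := by
      show ("has(" ++ t ++ ")").toList = _
      rw [String.toList_append, String.toList_append]
      rfl
    have hfrontK : ("token_pair=" ++ x ++ "__" ++ y).toList =
        't' :: ("oken_pair=".toList ++ x.toList ++ "__".toList ++ y.toList) := by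
      rw [String.toList_append, String.toList_append, String.toList_append]
      simp
    have := congrArg String.toList ht'
    rw [hfront, hfrontK] at this
    exact absurd (List.head_eq_of_cons_eq this) (by decide)
  have hnew_ne : tfcNew (tfcFeats0 doc).keys
      (((PySem.List.pyRange 0 ((doc.length : Int) - k + 1)).flatMap
        (fun i => (combos2 (PySem.List.slice doc (some i) (some (i + k)))).map
          (fun co => ("token_pair=" ++ co.1 ++ "__" ++ co.2, (1 : Int))))).map Prod.fst) ≠ [] := by
    intro h0
    have hKin := (tfcMem_new _ _ ("token_pair=" ++ x ++ "__" ++ y)).2 ⟨hKmem, hKnotS⟩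
    rw [h0] at hKin
    exact List.not_mem_nil hKin
  have hlen := congrArg List.length he
  rw [hitems, List.length_map, List.length_append] at hlen
  have hlenB : (tfcFeats0 doc).items.length = (tfcFeats0 doc).keys.length := by
    show _ = ((tfcFeats0 doc).items.map Prod.fst).length
    rw [List.length_map]
  rw [hlenB] at hlen
  have hz : (tfcNew (tfcFeats0 doc).keys
      (((PySem.List.pyRange 0 ((doc.length : Int) - k + 1)).flatMap
        (fun i => (combos2 (PySem.List.slice doc (some i) (some (i + k)))).map
          (fun co => ("token_pair=" ++ co.1 ++ "__" ++ co.2, (1 : Int))))).map Prod.fst)).length = 0 := by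
    omega
  exact hnew_ne (List.length_eq_zero_iff.1 hz)

-- ===== VERDICT (by name: the statement is the Claim_ definition above) =====
theorem token_featureCat_spec : Claim_unchanged_token_featureCat := by
  intro doc k _ hnd
  exact tfcMain doc k hnd

theorem token_featureCat_changed : Claim_changed_token_featureCat := by
  unfold Claim_changed_token_featureCat; decide

theorem token_featureCat_tight : Claim_exact_token_featureCat := by
  intro doc k _ hD
  exact tfcExact doc k hD
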